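-- pv_equiv track=rewrite | github.com/bbookng/baekjoon | Spam Detection.py | getSpamEmails
-- ===== SOURCE A (Python) =====
-- from collections import Counter
--
-- def getSpamEmails(subjects, spam_words):
--     result = []
--
--     spam_words = set(word.lower() for word in spam_words)
--
--     for subject in subjects:
--         subject_words = subject.lower().split()
--         word_count = Counter(subject_words)
--
--         spam_count = 0
--         for word in word_count:
--             if spam_count == 2:
--                 break
--             if word in spam_words:
--                 spam_count += min(2, word_count[word])
--
--         result.append("spam" if spam_count >= 2 else "not_spam")
--
--     return result
-- ===== SOURCE B (Python) =====
-- def getSpamEmails(subjects, spam_words):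
--     spam = {w.lower() for w in spam_words}
--     return ["spam" if sum(w in spam for w in subject.lower().split()) >= 2 else "not_spam"
--             for subject in subjects]
-- ===== Notes on version B (the rewrite author's own statement) =====
-- stated objective: simpler
-- what changed: B drops the Counter, the distinct-word loop and the capped accumulator entirely: it just counts spam-word occurrences (with multiplicity) in each subject and labels spam iff that count is at least 2, since the min(2,count) cap over distinct words reaches 2 exactly when the raw occurrence count does.
import Mathlib
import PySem

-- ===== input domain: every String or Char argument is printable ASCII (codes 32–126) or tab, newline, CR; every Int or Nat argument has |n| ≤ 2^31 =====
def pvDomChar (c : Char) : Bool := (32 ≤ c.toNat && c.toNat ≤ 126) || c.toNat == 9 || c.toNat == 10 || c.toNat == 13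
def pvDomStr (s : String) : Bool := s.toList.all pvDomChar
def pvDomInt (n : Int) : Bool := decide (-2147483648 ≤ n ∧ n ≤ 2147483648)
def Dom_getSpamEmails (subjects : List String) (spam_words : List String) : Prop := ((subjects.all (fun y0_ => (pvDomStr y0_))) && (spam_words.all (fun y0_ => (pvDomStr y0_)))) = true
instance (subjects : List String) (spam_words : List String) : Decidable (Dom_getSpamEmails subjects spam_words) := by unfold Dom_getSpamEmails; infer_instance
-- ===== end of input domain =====

-- B drops the Counter, the distinct-word pass and the capped accumulator: it just counts
-- spam-word occurrences in each subject and compares the count with 2 (simpler; same result).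

-- ===== PORT A =====
-- 'break' is modelled exactly: once spam_count == 2 the fold returns its state unchanged,
-- which is what the skipped iterations would have done.
def getSpamEmails (subjects : List String) (spam_words : List String) : List String :=
  let spamWords : PySem.Set String := PySem.Set.ofList (spam_words.map (fun word => PySem.Str.lower word))
  subjects.foldl (fun result subject =>
    let subject_words := PySem.Str.split₀ (PySem.Str.lower subject)
    let word_count := PySem.Dict.counter subject_words
    let spam_count : Int :=
      word_count.keys.foldl (fun sc word =>
        if sc == 2 then sc
        else if PySem.Set.contains spamWords word then sc + min 2 (word_count.getD word 0)
        else sc) 0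
    result ++ [if 2 ≤ spam_count then "spam" else "not_spam"]) []

-- ===== PORT B =====
-- sum(w in spam for w in …) is the number of words satisfying the membership test: countP.
def getSpamEmails_alt (subjects : List String) (spam_words : List String) : List String :=
  let spam : PySem.Set String := PySem.Set.ofList (spam_words.map (fun w => PySem.Str.lower w))
  subjects.map (fun subject =>
    if 2 ≤ ((PySem.Str.split₀ (PySem.Str.lower subject)).countP
              (fun w => PySem.Set.contains spam w) : Int)
    then "spam" else "not_spam")

-- ===== PRECONDITION & SPEC =====
def Spec_getSpamEmails (subjects : List String) (spam_words : List String) (out : List String) : Prop := out = getSpamEmails_alt subjects spam_words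
instance (subjects : List String) (spam_words : List String) (out : List String) : Decidable (Spec_getSpamEmails subjects spam_words out) := by unfold Spec_getSpamEmails; infer_instance

-- ===== CLAIM (what is proved, stated in full; the proofs are below) =====
def Claim_equal_getSpamEmails : Prop := ∀ (subjects : List String) (spam_words : List String), Dom_getSpamEmails subjects spam_words → Spec_getSpamEmails subjects spam_words (getSpamEmails subjects spam_words)

-- ===== LEMMAS AND PROOFS =====

-- A's inner loop is frozen once the state is 2.
theorem foldA_two (p : String → Bool) (f : String → Int) (ks : List String) :
    ks.foldl (fun sc k => if sc == 2 then sc else if p k then sc + min 2 (f k) else sc) 2 = 2 := by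
  induction ks with
  | nil => rfl
  | cons k ks ih => simpa using ih

-- A's inner loop reaches 2 iff the capped per-word sum does.
theorem foldA_ge_two (p : String → Bool) (f : String → Int) (ks : List String) :
    ∀ (a : Int), 0 ≤ a → (∀ k ∈ ks, 0 ≤ f k) →
    (2 ≤ ks.foldl (fun sc k => if sc == 2 then sc else if p k then sc + min 2 (f k) else sc) a
      ↔ 2 ≤ a + (ks.map (fun k => if p k then min 2 (f k) else 0)).sum) := by
  induction ks with
  | nil => intro a _ _; simp
  | cons k ks ih =>
    intro a ha hf
    simp only [List.foldl_cons, List.map_cons, List.sum_cons]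
    by_cases hc : a = 2
    · subst hc
      simp only [beq_self_eq_true, if_true]
      rw [foldA_two]
      have h1 : (0:Int) ≤ if p k then min 2 (f k) else 0 := by
        split_ifs with h
        · have := hf k (by simp); omega
        · omega
      have h2 : (0:Int) ≤ (ks.map (fun k => if p k then min 2 (f k) else 0)).sum := by
        apply List.sum_nonneg
        intro x hx
        simp only [List.mem_map] at hx
        obtain ⟨y, hy, rfl⟩ := hx
        split_ifs with h
        · have := hf y (by simp [hy]); omega
        · omega
      constructor <;> intro <;> omega
    · rw [if_neg (by simpa using hc)]
      have step : (if p k then a + min 2 (f k) else a)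
          = a + (if p k then min 2 (f k) else 0) := by split_ifs <;> omega
      by_cases hw : p k = true
      · rw [if_pos hw]
        have hfk := hf k (by simp)
        rw [ih (a + min 2 (f k)) (by omega) (fun x hx => hf x (by simp [hx])), if_pos hw]
        omega
      · rw [if_neg hw, ih a ha (fun x hx => hf x (by simp [hx])), if_neg hw]
        omega

-- over a nodup key list containing x, the indicator sum picks out x once
theorem sum_indicator_zero (p : String → Bool) (x : String) (ks : List String) (hx : x ∉ ks) :
    (ks.map (fun k => if p k ∧ k = x then (1:Int) else 0)).sum = 0 := by
  induction ks with
  | nil => rfl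
  | cons k ks ih =>
    simp only [List.mem_cons, not_or] at hx
    simp only [List.map_cons, List.sum_cons, ih hx.2]
    rw [if_neg (by rintro ⟨_, rfl⟩; exact hx.1 rfl)]
    ring

theorem sum_indicator (p : String → Bool) (x : String) (ks : List String)
    (hnd : ks.Nodup) (hx : x ∈ ks) :
    (ks.map (fun k => if p k ∧ k = x then (1:Int) else 0)).sum = if p x then 1 else 0 := by
  induction ks with
  | nil => cases hx
  | cons k ks ih =>
    simp only [List.map_cons, List.sum_cons]
    rcases List.mem_cons.mp hx with rfl | hmem
    · rw [sum_indicator_zero p x ks (List.nodup_cons.mp hnd).1]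
      by_cases h : p x = true <;> simp [h]
    · rw [ih (List.nodup_cons.mp hnd).2 hmem]
      rw [if_neg (by rintro ⟨_, rfl⟩; exact (List.nodup_cons.mp hnd).1 hmem)]
      ring

-- the per-distinct-word count sum over a covering nodup key list is countP
theorem sum_counts (p : String → Bool) (ks : List String) (hnd : ks.Nodup) :
    ∀ (ws : List String), (∀ x ∈ ws, x ∈ ks) →
    (ks.map (fun k => if p k then (ws.count k : Int) else 0)).sum = (ws.countP p : Int) := by
  intro ws
  induction ws with
  | nil => intro _; simp [ite_self]
  | cons x ws ih =>
    intro hcov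
    have hx : x ∈ ks := hcov x (by simp)
    have h1 : (ks.map (fun k => if p k then (((x :: ws).count k : Nat) : Int) else 0)).sum
        = (ks.map (fun k => (if p k then (ws.count k : Int) else 0)
            + (if p k ∧ k = x then (1:Int) else 0))).sum := by
      apply congrArg
      apply List.map_congr_left
      intro k _
      rw [List.count_cons]
      by_cases hp : p k = true
      · by_cases hkx : k = x
        · subst hkx; simp [hp]
        · have : (x == k) = false := by simp [Ne.symm hkx]
          simp [hp, this, hkx]
      · simp [hp]
    rw [h1, PySem.List.sum_map_add_int,
      ih (fun y hy => hcov y (by simp [hy])),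
      sum_indicator p x ks hnd hx, List.countP_cons]
    by_cases hp : p x = true <;> push_cast <;> simp [hp]

-- capping each term at 2 does not change whether the sum reaches 2
theorem capped_iff (g h : String → Int) (ks : List String)
    (hyp : ∀ k ∈ ks, 0 ≤ g k ∧ g k ≤ h k ∧ (g k < 2 → g k = h k)) :
    (2 ≤ (ks.map g).sum ↔ 2 ≤ (ks.map h).sum) := by
  constructor
  · intro hg
    have : (ks.map g).sum ≤ (ks.map h).sum := by
      apply List.sum_le_sum
      intro k hk; exact (hyp k hk).2.1
    omega
  · intro hh
    by_contra hg
    rw [Int.not_le] at hg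
    have hnn : ∀ x ∈ ks.map g, (0:Int) ≤ x := by
      intro x hx
      obtain ⟨y, hy, rfl⟩ := List.mem_map.mp hx
      exact (hyp y hy).1
    have heq : ks.map g = ks.map h := by
      apply List.map_congr_left
      intro k hk
      have hle : g k ≤ (ks.map g).sum :=
        List.single_le_sum hnn _ (List.mem_map.mpr ⟨k, hk, rfl⟩)
      exact (hyp k hk).2.2 (by omega)
    rw [heq] at hg
    omega

-- per-subject: A's label equals B's label
theorem label_eq (S : PySem.Set String) (ws : List String) :
    (if 2 ≤ (PySem.Dict.counter ws).keys.foldl (fun sc word =>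
        if sc == 2 then sc
        else if PySem.Set.contains S word then sc + min 2 ((PySem.Dict.counter ws).getD word 0)
        else sc) 0 then "spam" else "not_spam")
    = (if 2 ≤ (ws.countP (fun w => PySem.Set.contains S w) : Int)
        then "spam" else "not_spam") := by
  have hrwA : (PySem.Dict.counter ws).keys.foldl (fun sc word =>
        if sc == 2 then sc
        else if PySem.Set.contains S word then sc + min 2 ((PySem.Dict.counter ws).getD word 0)
        else sc) 0
      = (PySem.Set.ofList ws).foldl (fun sc word =>
        if sc == 2 then sc
        else if PySem.Set.contains S word then sc + min 2 ((ws.count word : Nat) : Int)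
        else sc) 0 := by
    rw [PySem.Dict.keys_counter]
    apply congrArg (fun f => List.foldl f 0 (PySem.Set.ofList ws))
    funext sc word
    rw [PySem.Dict.getD_counter]
  rw [hrwA]
  apply if_congr _ rfl rfl
  rw [foldA_ge_two (fun w => PySem.Set.contains S w) (fun w => ((ws.count w : Nat) : Int))
      (PySem.Set.ofList ws) 0 (le_refl 0) (fun k _ => by positivity)]
  simp only [zero_add]
  rw [capped_iff (fun k => if PySem.Set.contains S k then min 2 ((ws.count k : Nat) : Int) else 0)
        (fun k => if PySem.Set.contains S k then ((ws.count k : Nat) : Int) else 0)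
        (PySem.Set.ofList ws)
        (by
          intro k _
          refine ⟨?_, ?_, ?_⟩ <;> beta_reduce <;> split_ifs <;> omega)]
  rw [sum_counts (fun w => PySem.Set.contains S w) (PySem.Set.ofList ws)
      (PySem.Set.nodup_ofList ws) ws (fun x hx => (PySem.Set.mem_ofList ws x).mpr hx)]

-- ===== VERDICT (by name: the statement is the Claim_ definition above) =====
theorem getSpamEmails_spec : Claim_equal_getSpamEmails := by
  intro subjects spam_words _
  unfold Spec_getSpamEmails getSpamEmails getSpamEmails_alt
  simp only [PySem.List.foldl_append_singleton_eq_map, List.nil_append]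
  apply List.map_congr_left
  intro subject _
  exact label_eq (PySem.Set.ofList (spam_words.map (fun w => PySem.Str.lower w)))
    (PySem.Str.split₀ (PySem.Str.lower subject))
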